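-- pv_equiv track=rewrite | github.com/Fransou/Chess_bot | deepQ.py | revert_prediction
-- ===== SOURCE A (Python) =====
-- def revert_prediction(move):
--     n_move = ''
--     for i in range(0,len(move)):
--         if i in [1,3]:
--             n_move += str(8-int(move[i])+1)
--         else:
--             n_move += move[i]
--     return n_move
-- ===== SOURCE B (Python) =====
-- def revert_prediction(move):
--     chars = list(move)
--     for i in (1, 3):
--         if i < len(move):
--             chars[i] = str(9 - int(move[i]))
--     return ''.join(chars)
-- ===== Notes on version B (the rewrite author's own statement) =====
-- stated objective: simpler
-- what changed: Instead of scanning every index and testing each against [1,3], B builds a character list once and rewrites only the two rank positions (1 and 3, length-guarded) in place, then joins.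
import Mathlib
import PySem

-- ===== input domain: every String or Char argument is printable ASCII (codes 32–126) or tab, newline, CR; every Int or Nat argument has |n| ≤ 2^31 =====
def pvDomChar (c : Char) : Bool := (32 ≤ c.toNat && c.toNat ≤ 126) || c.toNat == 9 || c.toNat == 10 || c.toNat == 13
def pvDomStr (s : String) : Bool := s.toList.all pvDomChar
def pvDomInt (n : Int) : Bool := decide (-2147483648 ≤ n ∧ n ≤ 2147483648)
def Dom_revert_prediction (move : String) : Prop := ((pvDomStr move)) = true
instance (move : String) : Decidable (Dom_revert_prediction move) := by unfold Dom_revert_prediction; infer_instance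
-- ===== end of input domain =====

-- B rewrites only the two rank positions of a copied character list instead of scanning
-- and testing every index; same return value on Pre_ (objective: simpler).

-- ===== PORT A =====
-- n_move = ''; for i in range(0, len(move)): if i in [1,3]: n_move += str(8-int(move[i])+1) else: n_move += move[i]
-- (int(move[i]) raising ValueError on a non-digit is excluded by Pre_; the port reads a default 0 there)
def revert_prediction (move : String) : String :=
  String.mk ((PySem.List.pyRange 0 (PySem.List.len move.toList) 1).foldl
    (fun acc i =>
      if i = 1 ∨ i = 3 then
        acc ++ PySem.Int.toChars (8 - (PySem.Int.ofChars? [PySem.List.pyGetD move.toList i ' ']).getD 0 + 1)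
      else
        acc ++ [PySem.List.pyGetD move.toList i ' ']) [])

-- ===== PORT B =====
-- chars = list(move); for i in (1, 3): if i < len(move): chars[i] = str(9 - int(move[i])); return ''.join(chars)
-- (a Python list of 1-char strings is List (List Char); ''.join is PySem.Chars.join [])
def revert_prediction_alt (move : String) : String :=
  String.mk (PySem.Chars.join []
    ([(1 : Int), 3].foldl
      (fun out i =>
        if i < PySem.List.len move.toList then
          PySem.List.pySetD out i
            (PySem.Int.toChars (9 - (PySem.Int.ofChars? [PySem.List.pyGetD move.toList i ' ']).getD 0))
        else out)
      (move.toList.map (fun c => [c]))))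

-- ===== PRECONDITION & SPEC =====
-- Pre_ excludes exactly the inputs on which Python A raises ValueError: a character at
-- position 1 or 3 that is not a digit (int(move[i]) fails there).
def Pre_revert_prediction (move : String) : Prop :=
  (move.toList[1]?.all PySem.Chars.isdigit) = true ∧ (move.toList[3]?.all PySem.Chars.isdigit) = true
instance (move : String) : Decidable (Pre_revert_prediction move) := by
  unfold Pre_revert_prediction; infer_instance
def pvWitness_revert_prediction : String := "b2b4"

def Spec_revert_prediction (move : String) (out : String) : Prop := out = revert_prediction_alt move
instance (move : String) (out : String) : Decidable (Spec_revert_prediction move out) := by unfold Spec_revert_prediction; infer_instance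

-- ===== CLAIM (what is proved, stated in full; the proofs are below) =====
def Claim_equal_revert_prediction : Prop := ∀ (move : String), Dom_revert_prediction move → Pre_revert_prediction move → Spec_revert_prediction move (revert_prediction move)

-- ===== LEMMAS AND PROOFS =====

theorem pySetD_eq_set {α : Type} (l : List α) (i : Int) (v : α)
    (h0 : 0 ≤ i) (h : i.toNat < l.length) :
    PySem.List.pySetD l i v = l.set i.toNat v := by
  simp [PySem.List.pySetD, PySem.List.pySet?, PySem.List.pyIdx?]
  split_ifs with h1 <;> try rfl
  omega

theorem join_nil_eq_flatten (ps : List (List Char)) :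
    PySem.Chars.join [] ps = ps.flatten := by
  simp only [PySem.Chars.join]
  induction ps with
  | nil => rfl
  | cons a t ih => cases t <;> simp_all [List.intercalate, List.intersperse]

theorem foldl_ite_append {α β : Type} (p : α → Prop) [DecidablePred p]
    (f g : α → List β) (l : List α) (acc : List β) :
    l.foldl (fun acc x => if p x then acc ++ f x else acc ++ g x) acc
      = acc ++ l.flatMap (fun x => if p x then f x else g x) := by
  induction l generalizing acc with
  | nil => simp
  | cons a t ih => by_cases h : p a <;> simp [h, ih]

theorem revert_prediction_lists_eq (move : String) :
    revert_prediction move = revert_prediction_alt move := by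
  unfold revert_prediction revert_prediction_alt
  congr 1
  rw [foldl_ite_append, join_nil_eq_flatten, List.nil_append,
      List.flatMap_def, PySem.List.len_eq, PySem.List.pyRange_one]
  simp only [List.foldl_cons, List.foldl_nil, Int.sub_zero, Int.toNat_natCast, List.map_map]
  congr 1
  have h98 : ∀ v : Int, 8 - v + 1 = 9 - v := by omega
  by_cases h3 : (3 : Int) < (move.toList.length : Int)
  · have h1 : (1 : Int) < (move.toList.length : Int) := by omega
    rw [if_pos h1, if_pos h3,
        pySetD_eq_set (List.map (fun c => [c]) move.toList) 1 _ (by omega)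
          (by rw [List.length_map]; omega),
        pySetD_eq_set _ 3 _ (by omega) (by rw [List.length_set, List.length_map]; omega)]
    apply List.ext_getElem
    · rw [List.length_map, List.length_range, List.length_set, List.length_set, List.length_map]
    · intro k hk1 hk2
      rw [List.length_map, List.length_range] at hk1
      simp only [Function.comp_apply, List.getElem_map, List.getElem_range, zero_add,
                 List.getElem_set, PySem.List.pyGetD_natCast]
      by_cases e1 : k = 1
      · subst e1; simp [h98, PySem.List.pyGetD_ofNat']
      · by_cases e3 : k = 3
        · subst e3; simp [h98, PySem.List.pyGetD_ofNat']
        · have hc : ¬(((k : Int)) = 1 ∨ ((k : Int)) = 3) := by omega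
          rw [if_neg hc, if_neg (show ¬(Int.toNat 3 = k) by omega),
              if_neg (show ¬(Int.toNat 1 = k) by omega),
              List.getD_eq_getElem?_getD, List.getElem?_eq_getElem hk1]
          rfl
  · rw [if_neg h3]
    by_cases h1 : (1 : Int) < (move.toList.length : Int)
    · rw [if_pos h1, pySetD_eq_set _ _ _ (by omega) (by rw [List.length_map]; omega)]
      apply List.ext_getElem
      · rw [List.length_map, List.length_range, List.length_set, List.length_map]
      · intro k hk1 hk2
        rw [List.length_map, List.length_range] at hk1
        simp only [Function.comp_apply, List.getElem_map, List.getElem_range, zero_add,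
                   List.getElem_set, PySem.List.pyGetD_natCast]
        by_cases e1 : k = 1
        · subst e1; simp [h98, PySem.List.pyGetD_ofNat']
        · have hc : ¬(((k : Int)) = 1 ∨ ((k : Int)) = 3) := by omega
          rw [if_neg hc, if_neg (show ¬(Int.toNat 1 = k) by omega),
              List.getD_eq_getElem?_getD, List.getElem?_eq_getElem hk1]
          rfl
    · rw [if_neg h1]
      apply List.ext_getElem
      · rw [List.length_map, List.length_range, List.length_map]
      · intro k hk1 hk2
        rw [List.length_map, List.length_range] at hk1
        simp only [Function.comp_apply, List.getElem_map, List.getElem_range, zero_add,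
                   PySem.List.pyGetD_natCast]
        have hc : ¬(((k : Int)) = 1 ∨ ((k : Int)) = 3) := by omega
        rw [if_neg hc, List.getD_eq_getElem?_getD, List.getElem?_eq_getElem hk1]
        rfl

-- ===== VERDICT (by name: the statement is the Claim_ definition above) =====
theorem revert_prediction_spec : Claim_equal_revert_prediction := by
  intro move _ _
  unfold Spec_revert_prediction
  exact revert_prediction_lists_eq move
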